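-- pv_equiv track=rewrite | github.com/satyamsingh-stack/Leetcode | String/Check if One String Swap Can Make Strings Equal.py | solution
-- ===== SOURCE A (Python) =====
-- def solution(st1,st2):
--     c=0
--     for i in range(len(st1)):
--         if(st1[i]!=st2[i]):
--             c=c+1
--     st1=sorted(st1)
--     st2=sorted(st2)
--     if(c==0 or c==2 and st1==st2):
--         return True
--     return False
-- ===== SOURCE B (Python) =====
-- def solution(st1, st2):
--     pairs = [(a, b) for a, b in zip(st1, st2) if a != b]
--     if not pairs:
--         return True
--     if len(pairs) != 2 or len(st1) != len(st2):
--         return False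
--     (a1, b1), (a2, b2) = pairs
--     return a1 == b2 and a2 == b1
-- ===== Notes on version B (the rewrite author's own statement) =====
-- stated objective: faster
-- what changed: Single linear pass collecting the mismatched character pairs over zip(st1,st2), then a direct swap check on the (at most) two pairs, replacing A's sort of both whole strings and comparison of the sorted lists.
import Mathlib
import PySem

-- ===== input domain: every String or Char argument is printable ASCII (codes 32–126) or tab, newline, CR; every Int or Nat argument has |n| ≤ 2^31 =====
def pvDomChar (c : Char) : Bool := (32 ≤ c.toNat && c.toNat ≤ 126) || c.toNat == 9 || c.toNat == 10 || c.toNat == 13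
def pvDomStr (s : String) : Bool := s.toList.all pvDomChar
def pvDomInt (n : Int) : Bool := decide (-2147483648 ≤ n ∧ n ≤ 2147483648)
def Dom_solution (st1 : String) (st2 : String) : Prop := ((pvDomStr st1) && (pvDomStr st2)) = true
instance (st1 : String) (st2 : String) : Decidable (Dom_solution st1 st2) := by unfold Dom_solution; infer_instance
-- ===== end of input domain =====

-- B replaces A's sort-both-strings check by a single linear pass collecting the mismatched
-- character pairs and a direct swap test on the (at most) two pairs.

-- ===== PORT A =====
-- transliteration of A: count mismatching positions by index, then compare sorted(st1), sorted(st2)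
def solution (st1 : String) (st2 : String) : Bool :=
  let l1 := st1.toList
  let l2 := st2.toList
  let c : Int := (PySem.List.pyRange 0 (l1.length : Int)).foldl
    (fun c i => if PySem.List.pyGet? l1 i ≠ PySem.List.pyGet? l2 i then c + 1 else c) 0
  let s1 := PySem.List.sorted l1 (fun x => x)
  let s2 := PySem.List.sorted l2 (fun x => x)
  if c = 0 ∨ (c = 2 ∧ s1 = s2) then true else false

-- ===== PORT B =====
-- transliteration of Source B: one pass over zip collecting mismatched pairs, then a swap check
def solution_alt (st1 : String) (st2 : String) : Bool :=
  let pairs := (st1.toList.zip st2.toList).filter (fun p => p.1 != p.2)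
  if pairs = [] then true
  else if pairs.length ≠ 2 ∨ st1.toList.length ≠ st2.toList.length then false
  else match pairs with
    | (a1, b1) :: (a2, b2) :: _ => a1 == b2 && a2 == b1
    | _ => false

-- ===== PRECONDITION & SPEC =====
-- Pre_ excludes exactly len(st1) > len(st2), where A raises IndexError on st2[i].
def Pre_solution (st1 : String) (st2 : String) : Prop :=
  st1.toList.length ≤ st2.toList.length
instance (st1 : String) (st2 : String) : Decidable (Pre_solution st1 st2) := by
  unfold Pre_solution; infer_instance

def pvWitness_solution : String × String := ("bank", "kanb")

def Spec_solution (st1 : String) (st2 : String) (out : Bool) : Prop := out = solution_alt st1 st2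
instance (st1 : String) (st2 : String) (out : Bool) : Decidable (Spec_solution st1 st2 out) := by
  unfold Spec_solution; infer_instance

-- ===== CLAIM (what is proved, stated in full; the proofs are below) =====
def Claim_equal_solution : Prop := ∀ (st1 : String) (st2 : String), Dom_solution st1 st2 → Pre_solution st1 st2 → Spec_solution st1 st2 (solution st1 st2)

-- ===== LEMMAS AND PROOFS =====

-- A's counting loop over indices computes the number of mismatched pairs of zip.
theorem countLoop_eq (l1 l2 : List Char) (n : Nat) (hn : n ≤ l1.length)
    (h : l1.length ≤ l2.length) :
    (PySem.List.pyRange 0 (n : Int)).foldl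
      (fun c i => if PySem.List.pyGet? l1 i ≠ PySem.List.pyGet? l2 i then c + 1 else c) (0 : Int)
    = (((l1.zip l2).take n).countP (fun p => p.1 != p.2) : Int) := by
  induction n with
  | zero => simp [PySem.List.pyRange]
  | succ k ih =>
      have hk : k ≤ l1.length := Nat.le_of_succ_le hn
      have hk1 : k < l1.length := hn
      have hk2 : k < l2.length := lt_of_lt_of_le hk1 h
      have hz : k < (l1.zip l2).length := by simp [List.length_zip]; omega
      have hrange : PySem.List.pyRange 0 ((k : Int) + 1) = PySem.List.pyRange 0 (k : Int) ++ [(k : Int)] :=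
        PySem.List.pyRange_one_succ_right (by positivity)
      have hcast : ((k + 1 : Nat) : Int) = (k : Int) + 1 := by push_cast; ring
      rw [hcast, hrange, List.foldl_append, ih hk]
      have hg1 : PySem.List.pyGet? l1 (k : Int) = some l1[k] := by
        rw [PySem.List.pyGet?_natCast]; simp [hk1]
      have hg2 : PySem.List.pyGet? l2 (k : Int) = some l2[k] := by
        rw [PySem.List.pyGet?_natCast]; simp [hk2]
      have htake : (l1.zip l2).take (k + 1) = (l1.zip l2).take k ++ [(l1[k], l2[k])] := by
        rw [List.take_add_one]
        simp [List.getElem?_eq_getElem hz]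
      rw [htake, List.countP_append]
      simp only [List.foldl_cons, List.foldl_nil, hg1, hg2, List.countP_cons]
      by_cases hne : l1[k] = l2[k] <;> simp [hne]

-- the matched part of the pairs contributes equally to both projections
theorem matched_map_eq (p : List (Char × Char)) :
    (p.filter (fun q => !(q.1 != q.2))).map Prod.fst
    = (p.filter (fun q => !(q.1 != q.2))).map Prod.snd := by
  induction p with
  | nil => rfl
  | cons q t ih =>
      by_cases hq : q.1 = q.2
      · simp [hq, ih]
      · simp [hq, ih]

-- for equal-length strings, l1 ~ l2 iff the mismatched firsts permute the mismatched seconds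
theorem perm_iff_mism (l1 l2 : List Char) (h : l1.length = l2.length) :
    l1.Perm l2 ↔ (((l1.zip l2).filter (fun p => p.1 != p.2)).map Prod.fst).Perm
                  (((l1.zip l2).filter (fun p => p.1 != p.2)).map Prod.snd) := by
  have h1 : List.map Prod.fst (l1.zip l2) = l1 := List.map_fst_zip (le_of_eq h)
  have h2 : List.map Prod.snd (l1.zip l2) = l2 := List.map_snd_zip (le_of_eq h.symm)
  have hperm := List.filter_append_perm (fun q : Char × Char => q.1 != q.2) (l1.zip l2)
  have e1 : l1.Perm (((l1.zip l2).filter (fun q => q.1 != q.2)).map Prod.fst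
      ++ ((l1.zip l2).filter (fun q => !(q.1 != q.2))).map Prod.snd) := by
    have e := (hperm.map Prod.fst).symm
    rw [List.map_append, matched_map_eq, h1] at e
    exact e
  have e2 : l2.Perm (((l1.zip l2).filter (fun q => q.1 != q.2)).map Prod.snd
      ++ ((l1.zip l2).filter (fun q => !(q.1 != q.2))).map Prod.snd) := by
    have e := (hperm.map Prod.snd).symm
    rw [List.map_append, h2] at e
    exact e
  constructor
  · intro hp
    exact (List.perm_append_right_iff _).mp (e1.symm.trans (hp.trans e2))
  · intro hp
    exact e1.trans ((hp.append_right _).trans e2.symm)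

-- a two-element permutation with the first components distinct is exactly a swap
theorem perm_two {a1 b1 a2 b2 : Char} (hne : a1 ≠ b1) :
    [a1, a2].Perm [b1, b2] ↔ (a1 = b2 ∧ a2 = b1) := by
  constructor
  · intro hp
    have ha1 : a1 = b1 ∨ a1 = b2 := by
      have := hp.mem_iff.mp (List.mem_cons_self ..)
      simpa using this
    have ha1' : a1 = b2 := ha1.resolve_left hne
    subst ha1'
    refine ⟨rfl, ?_⟩
    have h2 : [a1, a2].Perm [a1, b1] := hp.trans (List.Perm.swap _ _ _)
    have := h2.cons_inv
    simpa using this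
  · rintro ⟨rfl, rfl⟩
    exact List.Perm.swap _ _ _

-- ===== VERDICT (by name: the statement is the Claim_ definition above) =====
theorem solution_spec : Claim_equal_solution := by
  intro st1 st2 _ hpre
  have h : st1.toList.length ≤ st2.toList.length := hpre
  simp only [Spec_solution, solution, solution_alt]
  have htake : (st1.toList.zip st2.toList).take st1.toList.length = st1.toList.zip st2.toList :=
    List.take_of_length_le (by simp [List.length_zip])
  have hc := countLoop_eq st1.toList st2.toList st1.toList.length le_rfl h
  rw [htake, List.countP_eq_length_filter] at hc
  rw [hc]
  rcases hfil : (st1.toList.zip st2.toList).filter (fun p => p.1 != p.2) with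
    _ | ⟨⟨a1, b1⟩, _ | ⟨⟨a2, b2⟩, rest⟩⟩
  · simp [hfil]
  · simp [hfil]
  · rcases rest with _ | ⟨r, rs⟩
    · -- exactly two mismatched pairs
      have hmem : (a1, b1) ∈ (st1.toList.zip st2.toList).filter (fun p => p.1 != p.2) := by
        rw [hfil]; exact List.mem_cons_self ..
      have hne : a1 ≠ b1 := by
        have := (List.mem_filter.mp hmem).2
        simpa using this
      by_cases hlen : st1.toList.length = st2.toList.length
      · have hiff := PySem.List.sorted_id_eq_sorted_id_iff_perm st1.toList st2.toList
        have hp := perm_iff_mism st1.toList st2.toList hlen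
        rw [hfil] at hp
        simp only [List.map_cons, List.map_nil] at hp
        rw [hp, perm_two hne] at hiff
        simp only [hfil, hlen, hiff]
        by_cases h1 : a1 = b2 <;> by_cases h2 : a2 = b1 <;> simp [h1, h2]
      · have hslen : (PySem.List.sorted st1.toList (fun x => x)) ≠
            (PySem.List.sorted st2.toList (fun x => x)) := by
          intro he
          apply hlen
          have := congrArg List.length he
          simpa [PySem.List.length_sorted] using this
        have hlen' : ¬ st1.length = st2.length := by
          simpa [String.length_toList] using hlen
        simp [hfil, hslen, hlen']
    · simp [hfil]
      omega
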